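-- pv_equiv track=rewrite | github.com/ctrlmau/laboratorio-python-2023 | 03-candycrush-01/cc.py | calcola_punteggio
-- ===== SOURCE A (Python) =====
-- def calcola_punteggio(vicino_uguale):
--     numero_eliminati = 0
--     for vero_o_falso in vicino_uguale:
--         if vero_o_falso == True:
--             numero_eliminati = numero_eliminati + 1
--
--     if numero_eliminati == 2:
--         return 1
--     if numero_eliminati == 3:
--         return 3
--     if numero_eliminati == 4:
--         return 7
--     if numero_eliminati == 5:
--         return 15
--     if numero_eliminati == 6:
--         return 31
--     if numero_eliminati == 7:
--         return 63
--     if numero_eliminati > 7: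
--         return 127
-- ===== SOURCE B (Python) =====
-- def calcola_punteggio(vicino_uguale):
--     count = sum(1 for x in vicino_uguale if x == True)
--     if count < 2:
--         return None
--     return min(2 ** (count - 1) - 1, 127)
-- ===== Notes on version B (the rewrite author's own statement) =====
-- stated objective: simpler
-- what changed: The seven-way if-chain lookup is replaced by the closed-form score min(2**(count-1)-1, 127) computed from the count obtained by a generator-sum instead of an explicit accumulator loop.
import Mathlib
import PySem

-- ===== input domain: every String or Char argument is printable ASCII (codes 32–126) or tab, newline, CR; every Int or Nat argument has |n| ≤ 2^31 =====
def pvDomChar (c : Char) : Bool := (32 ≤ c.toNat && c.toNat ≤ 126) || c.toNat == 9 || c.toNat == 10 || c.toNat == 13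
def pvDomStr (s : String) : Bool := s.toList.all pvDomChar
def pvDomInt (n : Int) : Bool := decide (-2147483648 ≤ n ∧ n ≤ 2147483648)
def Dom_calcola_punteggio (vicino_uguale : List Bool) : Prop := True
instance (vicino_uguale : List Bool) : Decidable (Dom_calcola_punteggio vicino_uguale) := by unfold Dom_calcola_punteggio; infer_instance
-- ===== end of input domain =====

-- B replaces the accumulator loop + seven-way if-chain by a count and the closed form min(2^(count-1)-1, 127); objective: simpler.

-- ===== PORT A =====
def calcola_punteggio (vicino_uguale : List Bool) : Option Int :=
  let numero_eliminati : Int :=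
    vicino_uguale.foldl (fun acc vero_o_falso =>
      if vero_o_falso == true then acc + 1 else acc) 0
  if numero_eliminati = 2 then some 1
  else if numero_eliminati = 3 then some 3
  else if numero_eliminati = 4 then some 7
  else if numero_eliminati = 5 then some 15
  else if numero_eliminati = 6 then some 31
  else if numero_eliminati = 7 then some 63
  else if numero_eliminati > 7 then some 127
  else none

-- ===== PORT B =====
def calcola_punteggio_alt (vicino_uguale : List Bool) : Option Int :=
  let count : Nat := (vicino_uguale.filter (fun x => x == true)).length
  if count < 2 then none
  else some (min ((2 : Int) ^ (count - 1) - 1) 127)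

-- ===== PRECONDITION & SPEC =====
def Spec_calcola_punteggio (vicino_uguale : List Bool) (out : Option Int) : Prop := out = calcola_punteggio_alt vicino_uguale
instance (vicino_uguale : List Bool) (out : Option Int) : Decidable (Spec_calcola_punteggio vicino_uguale out) := by unfold Spec_calcola_punteggio; infer_instance

-- ===== CLAIM (what is proved, stated in full; the proofs are below) =====
def Claim_equal_calcola_punteggio : Prop := ∀ (vicino_uguale : List Bool), Dom_calcola_punteggio vicino_uguale → Spec_calcola_punteggio vicino_uguale (calcola_punteggio vicino_uguale)

-- ===== LEMMAS AND PROOFS =====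

-- A's accumulator loop computes (the Int cast of) the length of B's filter.
theorem foldl_count_eq_filter_length (xs : List Bool) (a : Int) :
    xs.foldl (fun acc v => if v == true then acc + 1 else acc) a
      = a + ((xs.filter (fun x => x == true)).length : Int) := by
  induction xs generalizing a with
  | nil => simp
  | cons x xs ih =>
    rw [List.foldl_cons, ih]
    cases x <;> simp <;> push_cast <;> ring

-- the closed form agrees with the if-chain for every count
theorem chain_eq_closed (n : Nat) :
    (if (n : Int) = 2 then some (1 : Int)
     else if (n : Int) = 3 then some 3
     else if (n : Int) = 4 then some 7
     else if (n : Int) = 5 then some 15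
     else if (n : Int) = 6 then some 31
     else if (n : Int) = 7 then some 63
     else if (n : Int) > 7 then some 127
     else none)
      = (if n < 2 then none else some (min ((2 : Int) ^ (n - 1) - 1) 127)) := by
  match n with
  | 0 | 1 | 2 | 3 | 4 | 5 | 6 | 7 => decide
  | (m + 8) =>
    have hpow : (128 : Int) ≤ 2 ^ (m + 7) := by
      calc (128 : Int) = 2 ^ 7 := by norm_num
        _ ≤ 2 ^ (m + 7) := pow_le_pow_right₀ (by norm_num) (by omega)
    have hsub : m + 8 - 1 = m + 7 := by omega
    rw [hsub]
    have hmin : min ((2 : Int) ^ (m + 7) - 1) 127 = 127 := by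
      apply min_eq_right; omega
    rw [hmin]
    push_cast
    split_ifs <;> first | rfl | omega

-- ===== VERDICT (by name: the statement is the Claim_ definition above) =====
theorem calcola_punteggio_spec : Claim_equal_calcola_punteggio := by
  intro xs _
  unfold Spec_calcola_punteggio calcola_punteggio calcola_punteggio_alt
  simp only [foldl_count_eq_filter_length, zero_add]
  exact chain_eq_closed _
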